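-- pv_equiv track=rewrite | github.com/laurent-croq/advent-of-code | 2016/07.py | puzzles
-- ===== SOURCE A (Python) =====
-- def is_abba(seq):
--     for i in range(len(seq)-3):
--         if seq[i]==seq[i+3] and seq[i+1]==seq[i+2] and seq[i]!=seq[i+1]:
--             return(True)
--     return(False)
--
-- def supports_tls(seq):
--     found_abba = False
--     while seq != "":
--         if seq[0] == "[":
--             if is_abba(seq[1:seq.index("]")]):
--                 return(False)
--             seq = seq[seq.index("]")+1:]
--         else:
--             try:
--                 if is_abba(seq[:seq.index("[")]):
--                     found_abba = True
--                 seq = seq[seq.index("["):]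
--             except:
--                 return(found_abba or is_abba(seq))
--
--     return(found_abba)
--
-- def find_abas(seq, negate=False):
--     abas = []
--     for i in range(len(seq)-2):
--         if seq[i]==seq[i+2] and seq[i]!=seq[i+1]:
--             abas.append(seq[i+1]+seq[i]+seq[i+1] if negate else seq[i:i+3])
--     return(abas)
--
-- def supports_ssl(seq):
--     supernet_abas = []
--     hypernet_abas = []
--
--     while seq != "":
--         if seq[0] == "[":
--             hypernet_abas.extend(find_abas(seq[1:seq.index("]")], negate=True))
--             seq = seq[seq.index("]")+1:]
--         else:
--             try:
--                 supernet_abas.extend(find_abas(seq[:seq.index("[")]))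
--                 seq = seq[seq.index("["):]
--             except:
--                 supernet_abas.extend(find_abas(seq))
--                 return(len(set(supernet_abas).intersection(hypernet_abas))>0)
--
--     return(len(set(supernet_abas).intersection(hypernet_abas))>0)
--
-- def puzzles(input_lines, **extra_args):
--     total_tls = 0
--     total_ssl = 0
--     for line in input_lines:
--         total_tls += supports_tls(line)
--         total_ssl += supports_ssl(line)
--
--     yield(total_tls)
--     yield(total_ssl)
-- ===== SOURCE B (Python) =====
-- def _sections(line):
--     """Parse the line once into supernet and hypernet section lists.
--     A hypernet runs from a '[' to the first ']' after it (str.index raises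
--     ValueError on an unclosed hypernet, like the original)."""
--     supers, hypers = [], []
--     rest = line
--     while True:
--         open_ = rest.find('[')
--         if open_ < 0:
--             supers.append(rest)
--             return supers, hypers
--         supers.append(rest[:open_])
--         rest2 = rest[open_ + 1:]
--         close = rest2.index(']')
--         hypers.append(rest2[:close])
--         rest = rest2[close + 1:]
--
-- def _has_abba(s):
--     return any(s[i] == s[i + 3] and s[i + 1] == s[i + 2] and s[i] != s[i + 1]
--                for i in range(len(s) - 3))
--
-- def _abas(s):
--     return [s[i:i + 3] for i in range(len(s) - 2)
--             if s[i] == s[i + 2] and s[i] != s[i + 1]]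
--
-- def _babs(s):
--     return [s[i + 1] + s[i] + s[i + 1] for i in range(len(s) - 2)
--             if s[i] == s[i + 2] and s[i] != s[i + 1]]
--
-- def puzzles(input_lines, **extra_args):
--     total_tls = 0
--     total_ssl = 0
--     for line in input_lines:
--         supers, hypers = _sections(line)
--         if any(_has_abba(s) for s in supers) and not any(_has_abba(h) for h in hypers):
--             total_tls += 1
--         sup = {aba for s in supers for aba in _abas(s)}
--         hyp = {bab for h in hypers for bab in _babs(h)}
--         if sup & hyp:
--             total_ssl += 1
--     yield total_tls
--     yield total_ssl
-- ===== Notes on version B (the rewrite author's own statement) =====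
-- stated objective: simpler
-- what changed: B parses each line exactly once with a find/index scan into supernet and hypernet section lists and then computes TLS via any() over the sections and SSL via a set intersection of ABA/BAB triples, instead of A's two separate while-loops that re-slice the string and interleave parsing with the ABBA/ABA logic.
import Mathlib
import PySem

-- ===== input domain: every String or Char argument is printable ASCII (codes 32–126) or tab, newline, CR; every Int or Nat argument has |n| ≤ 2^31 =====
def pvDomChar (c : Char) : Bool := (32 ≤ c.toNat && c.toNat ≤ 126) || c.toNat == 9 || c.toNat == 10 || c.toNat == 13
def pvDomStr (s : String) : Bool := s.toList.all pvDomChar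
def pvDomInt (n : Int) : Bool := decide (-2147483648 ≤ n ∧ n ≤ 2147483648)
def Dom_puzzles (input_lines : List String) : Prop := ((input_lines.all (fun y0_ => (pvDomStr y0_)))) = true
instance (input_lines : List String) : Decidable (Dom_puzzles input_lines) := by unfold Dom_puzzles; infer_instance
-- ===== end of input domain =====

-- B parses each line ONCE into supernet/hypernet section lists and then applies any/set
-- checks, instead of A's two while-loops interleaving slicing with the logic (objective: simpler).

-- ===== PORT A =====

-- port of Python str.index: index of the first occurrence (none = ValueError)
def pvIdx? (ch : Char) : List Char → Option Nat
  | [] => none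
  | x :: xs => if x = ch then some 0 else (pvIdx? ch xs).map (· + 1)

-- is_abba: the window scan 'for i in range(len(seq)-3)'
def isAbba : List Char → Bool
  | a :: b :: c :: d :: rest => (a = d && b = c && a ≠ b) || isAbba (b :: c :: d :: rest)
  | _ => false

-- supports_tls's while loop; fuel = initial length makes the recursion structural
-- (each iteration strictly shortens seq, so the fuel never runs out).
def supportsTlsLoop : Nat → Bool → List Char → Bool
  | 0, found, _ => found
  | _ + 1, found, [] => found
  | fuel + 1, found, c :: cs =>
    if c = '[' then
      match pvIdx? ']' (c :: cs) with
      | some j =>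
        if isAbba (((c :: cs).drop 1).take (j - 1)) then false
        else supportsTlsLoop fuel found ((c :: cs).drop (j + 1))
      | none => false   -- Python raises ValueError here; excluded by Pre_
    else
      match pvIdx? '[' (c :: cs) with
      | some j => supportsTlsLoop fuel (found || isAbba ((c :: cs).take j)) ((c :: cs).drop j)
      | none => found || isAbba (c :: cs)   -- the except-branch

def supportsTls (s : String) : Bool := supportsTlsLoop s.toList.length false s.toList

-- find_abas: appends seq[i:i+3] (or negated b+a+b) for each aba window
def findAbas (negate : Bool) : List Char → List String
  | a :: b :: c :: rest =>
    (if a = c && a ≠ b then [String.ofList (if negate then [b, a, b] else [a, b, c])] else [])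
      ++ findAbas negate (b :: c :: rest)
  | _ => []

-- len(set(sup).intersection(hyp)) > 0
def sslFinish (sup hyp : List String) : Bool :=
  decide (0 < (PySem.Set.inter (PySem.Set.ofList sup) hyp).length)

-- supports_ssl's while loop, same fuel discipline as supportsTlsLoop
def supportsSslLoop : Nat → List String → List String → List Char → Bool
  | 0, sup, hyp, _ => sslFinish sup hyp
  | _ + 1, sup, hyp, [] => sslFinish sup hyp
  | fuel + 1, sup, hyp, c :: cs =>
    if c = '[' then
      match pvIdx? ']' (c :: cs) with
      | some j =>
        supportsSslLoop fuel sup (hyp ++ findAbas true (((c :: cs).drop 1).take (j - 1)))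
          ((c :: cs).drop (j + 1))
      | none => false   -- Python raises ValueError here; excluded by Pre_
    else
      match pvIdx? '[' (c :: cs) with
      | some j => supportsSslLoop fuel (sup ++ findAbas false ((c :: cs).take j)) hyp ((c :: cs).drop j)
      | none => sslFinish (sup ++ findAbas false (c :: cs)) hyp   -- the except-branch

def supportsSsl (s : String) : Bool := supportsSslLoop s.toList.length [] [] s.toList

def puzzles (input_lines : List String) : List Int :=
  let r := input_lines.foldl
    (fun (acc : Int × Int) line =>
      (acc.1 + (if supportsTls line then 1 else 0),
       acc.2 + (if supportsSsl line then 1 else 0))) (0, 0)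
  [r.1, r.2]

-- ===== PORT B =====

-- _sections: parse once; a hypernet runs from a '[' to the first ']' after it.
-- fuel = line length + 1 makes the while-loop structural (each iteration shortens rest).
def sectionsB : Nat → List (List Char) → List (List Char) → List Char →
    List (List Char) × List (List Char)
  | 0, supers, hypers, _ => (supers, hypers)   -- fuel exhausted (unreachable with fuel = length + 1)
  | fuel + 1, supers, hypers, rest =>
    match pvIdx? '[' rest with
    | none => (supers ++ [rest], hypers)
    | some o =>
      let rest2 := rest.drop (o + 1)
      match pvIdx? ']' rest2 with
      | some close =>
        sectionsB fuel (supers ++ [rest.take o]) (hypers ++ [rest2.take close])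
          (rest2.drop (close + 1))
      | none => (supers, hypers)   -- Python raises ValueError here; excluded by Pre_

-- _has_abba
def hasAbbaB : List Char → Bool
  | a :: b :: c :: d :: rest => (a = d && b = c && a ≠ b) || hasAbbaB (b :: c :: d :: rest)
  | _ => false

-- _abas
def abasB : List Char → List String
  | a :: b :: c :: rest =>
    (if a = c && a ≠ b then [String.ofList [a, b, c]] else []) ++ abasB (b :: c :: rest)
  | _ => []

-- _babs
def babsB : List Char → List String
  | a :: b :: c :: rest =>
    (if a = c && a ≠ b then [String.ofList [b, a, b]] else []) ++ babsB (b :: c :: rest)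
  | _ => []

def puzzles_alt (input_lines : List String) : List Int :=
  let r := input_lines.foldl
    (fun (acc : Int × Int) line =>
      let sh := sectionsB (line.toList.length + 1) [] [] line.toList
      let tlsOk := sh.1.any hasAbbaB && !(sh.2.any hasAbbaB)
      let supSet := PySem.Set.ofList (sh.1.flatMap abasB)
      let hypSet := PySem.Set.ofList (sh.2.flatMap babsB)
      let sslOk := decide (0 < (PySem.Set.inter supSet hypSet).length)
      (acc.1 + (if tlsOk then 1 else 0), acc.2 + (if sslOk then 1 else 0))) (0, 0)
  [r.1, r.2]

-- ===== PRECONDITION & SPEC =====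

-- every '[' in the line has some ']' after it (otherwise A's str.index raises ValueError)
def bracketOk (cs : List Char) : Prop :=
  ∀ t ∈ cs.tails, t.head? = some '[' → ']' ∈ t.tail

-- Pre_ excludes exactly the inputs on which A raises an uncaught ValueError
def Pre_puzzles (input_lines : List String) : Prop :=
  ∀ s ∈ input_lines, bracketOk s.toList

instance (input_lines : List String) : Decidable (Pre_puzzles input_lines) := by
  unfold Pre_puzzles bracketOk; infer_instance

def pvWitness_puzzles : List String := ["abba[mnop]qrst", "aba[bab]xyz", "ioxxoj[asdfgh]zxcvbn"]

def Spec_puzzles (input_lines : List String) (out : List Int) : Prop := out = puzzles_alt input_lines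
instance (input_lines : List String) (out : List Int) : Decidable (Spec_puzzles input_lines out) := by unfold Spec_puzzles; infer_instance

-- ===== CLAIM (what is proved, stated in full; the proofs are below) =====
def Claim_equal_puzzles : Prop := ∀ (input_lines : List String), Dom_puzzles input_lines → Pre_puzzles input_lines → Spec_puzzles input_lines (puzzles input_lines)

-- ===== LEMMAS AND PROOFS =====

-- reference parse: the list of (isHyper, section) pieces of cs read in mode m
def consHd (c : Char) (m : Bool) : List (Bool × List Char) → List (Bool × List Char)
  | (b, sec) :: t => (b, c :: sec) :: t
  | [] => [(m, [c])]

def secs : List Char → Bool → List (Bool × List Char)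
  | [], m => [(m, [])]
  | c :: rest, m =>
    if !m && c = '[' then (false, []) :: secs rest true
    else if m && c = ']' then (true, []) :: secs rest false
    else consHd c m (secs rest m)

def supsOf (l : List (Bool × List Char)) : List (List Char) :=
  (l.filter (fun p => !p.1)).map Prod.snd

def hypsOf (l : List (Bool × List Char)) : List (List Char) :=
  (l.filter (fun p => p.1)).map Prod.snd

theorem pvIdx?_none {ch : Char} : ∀ {cs : List Char}, pvIdx? ch cs = none → ch ∉ cs := by
  intro cs
  induction cs with
  | nil => simp
  | cons x xs ih =>
    simp only [pvIdx?]
    split_ifs with hx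
    · simp
    · intro h
      simp only [Option.map_eq_none_iff] at h
      simp only [List.mem_cons, not_or]
      exact ⟨fun e => hx e.symm, ih h⟩

theorem pvIdx?_some {ch : Char} : ∀ {cs : List Char} {j : Nat}, pvIdx? ch cs = some j →
    ∃ pre rest, cs = pre ++ ch :: rest ∧ pre.length = j ∧ ch ∉ pre := by
  intro cs
  induction cs with
  | nil => simp [pvIdx?]
  | cons x xs ih =>
    intro j h
    simp only [pvIdx?] at h
    split_ifs at h with hx
    · exact ⟨[], xs, by simp [hx, ← Option.some.inj h]⟩
    · simp only [Option.map_eq_some_iff] at h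
      obtain ⟨j', hj', rfl⟩ := h
      obtain ⟨pre, rest, rfl, hlen, hmem⟩ := ih hj'
      refine ⟨x :: pre, rest, rfl, by simp [hlen], ?_⟩
      simp only [List.mem_cons, not_or]
      exact ⟨fun e => hx e.symm, hmem⟩

theorem secs_open : ∀ (pre rest : List Char), '[' ∉ pre →
    secs (pre ++ '[' :: rest) false = (false, pre) :: secs rest true := by
  intro pre
  induction pre with
  | nil => intro rest _; simp [secs]
  | cons p pre ih =>
    intro rest h
    simp only [List.mem_cons, not_or] at h
    have hp : ¬ p = '[' := fun e => h.1 e.symm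
    simp [secs, hp, ih rest h.2, consHd]

theorem secs_close : ∀ (pre rest : List Char), ']' ∉ pre →
    secs (pre ++ ']' :: rest) true = (true, pre) :: secs rest false := by
  intro pre
  induction pre with
  | nil => intro rest _; simp [secs]
  | cons p pre ih =>
    intro rest h
    simp only [List.mem_cons, not_or] at h
    have hp : ¬ p = ']' := fun e => h.1 e.symm
    simp [secs, hp, ih rest h.2, consHd]

theorem secs_noOpen : ∀ (cs : List Char), '[' ∉ cs → secs cs false = [(false, cs)] := by
  intro cs
  induction cs with
  | nil => intro _; rfl
  | cons c rest ih =>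
    intro h
    simp only [List.mem_cons, not_or] at h
    have hp : ¬ c = '[' := fun e => h.1 e.symm
    simp [secs, hp, ih h.2, consHd]

theorem bracketOk_suffix {cs t : List Char} (h : bracketOk cs) (hs : t <:+ cs) : bracketOk t := by
  intro u hu
  exact h u ((List.mem_tails u cs).2 (((List.mem_tails u t).1 hu).trans hs))

theorem bracketOk_head {cs : List Char} (h : bracketOk ('[' :: cs)) : ']' ∈ cs := by
  have := h ('[' :: cs) ((List.mem_tails _ _).2 (List.suffix_refl _)) rfl
  simpa using this

theorem isAbba_nil : isAbba [] = false := rfl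

theorem tlsLoop_eq : ∀ (fuel : Nat) (cs : List Char) (found : Bool), cs.length ≤ fuel →
    bracketOk cs →
    supportsTlsLoop fuel found cs =
      ((found || (supsOf (secs cs false)).any isAbba) && !((hypsOf (secs cs false)).any isAbba)) := by
  intro fuel
  induction fuel with
  | zero =>
    intro cs found hlen _
    have : cs = [] := List.length_eq_zero_iff.1 (Nat.le_zero.1 hlen)
    subst this
    simp [supportsTlsLoop, secs, supsOf, hypsOf, isAbba]
  | succ fuel ih =>
    intro cs found hlen hB
    match cs with
    | [] => simp [supportsTlsLoop, secs, supsOf, hypsOf, isAbba]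
    | c :: cs' =>
      by_cases hc : c = '['
      · subst hc
        have hm : ']' ∈ cs' := bracketOk_head hB
        -- first "]" in the whole seq
        cases hidx : pvIdx? ']' cs' with
        | none => exact absurd hm (pvIdx?_none hidx)
        | some j' =>
          obtain ⟨pre, rest, rfl, hlenp, hpre⟩ := pvIdx?_some hidx
          have hstep : pvIdx? ']' ('[' :: (pre ++ ']' :: rest)) = some (j' + 1) := by
            simp [pvIdx?, hidx]
          have htake : (pre ++ ']' :: rest).take j' = pre := by
            rw [← hlenp]; exact List.take_left ..
          have hdrop : (pre ++ ']' :: rest).drop (j' + 1) = rest := by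
            rw [← hlenp, show pre.length + 1 = (pre ++ [']']).length by simp,
              show pre ++ ']' :: rest = (pre ++ [']']) ++ rest by simp]
            exact List.drop_left ..
          have hsecs : secs ('[' :: (pre ++ ']' :: rest)) false =
              (false, []) :: (true, pre) :: secs rest false := by
            simp [secs, secs_close pre rest hpre]
          have hrest : bracketOk rest :=
            bracketOk_suffix hB ⟨'[' :: pre ++ [']'], by simp⟩
          have hlenr : rest.length ≤ fuel := by
            simp only [List.length_cons, List.length_append] at hlen; omega
          simp only [supportsTlsLoop, hstep, Nat.add_sub_cancel, List.drop_succ_cons,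
            List.drop_zero, htake, hdrop, hsecs]
          by_cases habba : isAbba pre
          · simp [habba, supsOf, hypsOf]
          · rw [if_pos trivial, if_neg habba, ih rest found hlenr hrest]
            simp [supsOf, hypsOf, habba, isAbba_nil]
      · cases hidx : pvIdx? '[' (c :: cs') with
        | none =>
          have hno : '[' ∉ c :: cs' := pvIdx?_none hidx
          simp [supportsTlsLoop, if_neg hc, hidx, secs_noOpen _ hno, supsOf, hypsOf]
        | some j =>
          obtain ⟨pre, rest, hdec, hlenp, hpre⟩ := pvIdx?_some hidx
          have hprene : pre ≠ [] := by
            intro h; rw [h] at hdec; simp at hdec; exact hc hdec.1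
          have htake : (c :: cs').take j = pre := by
            rw [hdec, ← hlenp]; exact List.take_left ..
          have hdrop : (c :: cs').drop j = '[' :: rest := by
            rw [hdec, ← hlenp]; exact List.drop_left ..
          have hlenr : ('[' :: rest).length ≤ fuel := by
            have := congrArg List.length hdec
            simp only [List.length_cons, List.length_append] at this hlen ⊢
            have hp1 : 1 ≤ pre.length := by
              cases pre with
              | nil => exact absurd rfl hprene
              | cons _ _ => simp
            omega
          have hrest : bracketOk ('[' :: rest) :=
            bracketOk_suffix hB (by rw [hdec]; exact ⟨pre, rfl⟩)
          have hsecs : secs (c :: cs') false = (false, pre) :: secs rest true := by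
            rw [hdec]; exact secs_open pre rest hpre
          have hsecs2 : secs ('[' :: rest) false = (false, []) :: secs rest true := by
            simp [secs]
          simp only [supportsTlsLoop, if_neg hc, hidx, htake, hdrop,
            ih ('[' :: rest) (found || isAbba pre) hlenr hrest, hsecs, hsecs2]
          simp [supsOf, hypsOf, isAbba_nil, Bool.or_assoc]

theorem sslLoop_eq : ∀ (fuel : Nat) (cs : List Char) (sup hyp : List String), cs.length ≤ fuel →
    bracketOk cs →
    supportsSslLoop fuel sup hyp cs =
      sslFinish (sup ++ (supsOf (secs cs false)).flatMap (findAbas false))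
                (hyp ++ (hypsOf (secs cs false)).flatMap (findAbas true)) := by
  intro fuel
  induction fuel with
  | zero =>
    intro cs sup hyp hlen _
    have : cs = [] := List.length_eq_zero_iff.1 (Nat.le_zero.1 hlen)
    subst this
    simp [supportsSslLoop, secs, supsOf, hypsOf, findAbas]
  | succ fuel ih =>
    intro cs sup hyp hlen hB
    match cs with
    | [] => simp [supportsSslLoop, secs, supsOf, hypsOf, findAbas]
    | c :: cs' =>
      by_cases hc : c = '['
      · subst hc
        have hm : ']' ∈ cs' := bracketOk_head hB
        cases hidx : pvIdx? ']' cs' with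
        | none => exact absurd hm (pvIdx?_none hidx)
        | some j' =>
          obtain ⟨pre, rest, rfl, hlenp, hpre⟩ := pvIdx?_some hidx
          have hstep : pvIdx? ']' ('[' :: (pre ++ ']' :: rest)) = some (j' + 1) := by
            simp [pvIdx?, hidx]
          have htake : (pre ++ ']' :: rest).take j' = pre := by
            rw [← hlenp]; exact List.take_left ..
          have hdrop : (pre ++ ']' :: rest).drop (j' + 1) = rest := by
            rw [← hlenp, show pre.length + 1 = (pre ++ [']']).length by simp,
              show pre ++ ']' :: rest = (pre ++ [']']) ++ rest by simp]
            exact List.drop_left ..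
          have hsecs : secs ('[' :: (pre ++ ']' :: rest)) false =
              (false, []) :: (true, pre) :: secs rest false := by
            simp [secs, secs_close pre rest hpre]
          have hrest : bracketOk rest :=
            bracketOk_suffix hB ⟨'[' :: pre ++ [']'], by simp⟩
          have hlenr : rest.length ≤ fuel := by
            simp only [List.length_cons, List.length_append] at hlen; omega
          simp only [supportsSslLoop, hstep, Nat.add_sub_cancel, List.drop_succ_cons,
            List.drop_zero, htake, hdrop, hsecs,
            ih rest sup (hyp ++ findAbas true pre) hlenr hrest]
          simp [supsOf, hypsOf, findAbas]
      · cases hidx : pvIdx? '[' (c :: cs') with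
        | none =>
          have hno : '[' ∉ c :: cs' := pvIdx?_none hidx
          simp [supportsSslLoop, if_neg hc, hidx, secs_noOpen _ hno, supsOf, hypsOf]
        | some j =>
          obtain ⟨pre, rest, hdec, hlenp, hpre⟩ := pvIdx?_some hidx
          have hprene : pre ≠ [] := by
            intro h; rw [h] at hdec; simp at hdec; exact hc hdec.1
          have htake : (c :: cs').take j = pre := by
            rw [hdec, ← hlenp]; exact List.take_left ..
          have hdrop : (c :: cs').drop j = '[' :: rest := by
            rw [hdec, ← hlenp]; exact List.drop_left ..
          have hlenr : ('[' :: rest).length ≤ fuel := by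
            have := congrArg List.length hdec
            simp only [List.length_cons, List.length_append] at this hlen ⊢
            have hp1 : 1 ≤ pre.length := by
              cases pre with
              | nil => exact absurd rfl hprene
              | cons _ _ => simp
            omega
          have hrest : bracketOk ('[' :: rest) :=
            bracketOk_suffix hB (by rw [hdec]; exact ⟨pre, rfl⟩)
          have hsecs : secs (c :: cs') false = (false, pre) :: secs rest true := by
            rw [hdec]; exact secs_open pre rest hpre
          have hsecs2 : secs ('[' :: rest) false = (false, []) :: secs rest true := by
            simp [secs]
          simp only [supportsSslLoop, if_neg hc, hidx, htake, hdrop,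
            ih ('[' :: rest) (sup ++ findAbas false pre) hyp hlenr hrest, hsecs, hsecs2]
          simp [supsOf, hypsOf, findAbas]

theorem sectionsB_eq : ∀ (fuel : Nat) (rest : List Char) (supers hypers : List (List Char)),
    rest.length < fuel → bracketOk rest →
    sectionsB fuel supers hypers rest =
      (supers ++ supsOf (secs rest false), hypers ++ hypsOf (secs rest false)) := by
  intro fuel
  induction fuel with
  | zero => intro rest supers hypers hlen _; omega
  | succ fuel ih =>
    intro rest supers hypers hlen hB
    cases hidx : pvIdx? '[' rest with
    | none =>
      have hno : '[' ∉ rest := pvIdx?_none hidx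
      simp [sectionsB, hidx, secs_noOpen rest hno, supsOf, hypsOf]
    | some o =>
      obtain ⟨pre, rest2, rfl, hlenp, hpre⟩ := pvIdx?_some hidx
      have hdrop : (pre ++ '[' :: rest2).drop (o + 1) = rest2 := by
        rw [← hlenp, show pre.length + 1 = (pre ++ ['[']).length by simp,
          show pre ++ '[' :: rest2 = (pre ++ ['[']) ++ rest2 by simp]
        exact List.drop_left ..
      have hm : ']' ∈ rest2 :=
        bracketOk_head (bracketOk_suffix hB ⟨pre, rfl⟩)
      cases hidx2 : pvIdx? ']' rest2 with
      | none => exact absurd hm (pvIdx?_none hidx2)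
      | some close =>
        obtain ⟨mid, rest3, rfl, hlenm, hmid⟩ := pvIdx?_some hidx2
        have htake : (pre ++ '[' :: (mid ++ ']' :: rest3)).take o = pre := by
          rw [← hlenp]; exact List.take_left ..
        have htake2 : (mid ++ ']' :: rest3).take close = mid := by
          rw [← hlenm]; exact List.take_left ..
        have hdrop2 : (mid ++ ']' :: rest3).drop (close + 1) = rest3 := by
          rw [← hlenm, show mid.length + 1 = (mid ++ [']']).length by simp,
            show mid ++ ']' :: rest3 = (mid ++ [']']) ++ rest3 by simp]
          exact List.drop_left ..
        have hrest : bracketOk rest3 :=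
          bracketOk_suffix hB ⟨pre ++ '[' :: mid ++ [']'], by simp⟩
        have hlenr : rest3.length < fuel := by
          simp only [List.length_append, List.length_cons] at hlen; omega
        have hsecs : secs (pre ++ '[' :: (mid ++ ']' :: rest3)) false =
            (false, pre) :: (true, mid) :: secs rest3 false := by
          rw [secs_open pre _ hpre, secs_close mid rest3 hmid]
        simp only [sectionsB, hidx, hdrop, hidx2, htake, htake2, hdrop2,
          ih rest3 (supers ++ [pre]) (hypers ++ [mid]) hlenr hrest, hsecs]
        simp [supsOf, hypsOf]

theorem isAbba_eq_hasAbbaB : ∀ (cs : List Char), isAbba cs = hasAbbaB cs := by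
  intro cs
  induction cs using isAbba.induct <;> simp [isAbba, hasAbbaB, *]

theorem findAbas_false : ∀ (cs : List Char), findAbas false cs = abasB cs := by
  intro cs
  induction cs using abasB.induct <;> simp [findAbas, abasB, *]

theorem findAbas_true : ∀ (cs : List Char), findAbas true cs = babsB cs := by
  intro cs
  induction cs using babsB.induct <;> simp [findAbas, babsB, *]

theorem sslFinish_eq (L H : List String) :
    sslFinish L H =
      decide (0 < (PySem.Set.inter (PySem.Set.ofList L) (PySem.Set.ofList H)).length) := by
  simp only [sslFinish, decide_eq_decide, List.length_pos_iff_exists_mem]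
  constructor
  · rintro ⟨x, hx⟩
    have := (PySem.Set.mem_inter _ _ x).1 hx
    exact ⟨x, (PySem.Set.mem_inter _ _ x).2 ⟨this.1, (PySem.Set.mem_ofList H x).2 this.2⟩⟩
  · rintro ⟨x, hx⟩
    have := (PySem.Set.mem_inter _ _ x).1 hx
    exact ⟨x, (PySem.Set.mem_inter _ _ x).2 ⟨this.1, (PySem.Set.mem_ofList H x).1 this.2⟩⟩

theorem line_eq (s : String) (h : bracketOk s.toList) (acc : Int × Int) :
    (acc.1 + (if supportsTls s then 1 else 0),
     acc.2 + (if supportsSsl s then (1 : Int) else 0)) =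
    (let sh := sectionsB (s.toList.length + 1) [] [] s.toList
     let tlsOk := sh.1.any hasAbbaB && !(sh.2.any hasAbbaB)
     let supSet := PySem.Set.ofList (sh.1.flatMap abasB)
     let hypSet := PySem.Set.ofList (sh.2.flatMap babsB)
     let sslOk := decide (0 < (PySem.Set.inter supSet hypSet).length)
     (acc.1 + (if tlsOk then 1 else 0), acc.2 + (if sslOk then (1 : Int) else 0))) := by
  have hAB : isAbba = hasAbbaB := funext isAbba_eq_hasAbbaB
  have hFA : findAbas false = abasB := funext findAbas_false
  have hFB : findAbas true = babsB := funext findAbas_true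
  have hsec : sectionsB (s.toList.length + 1) [] [] s.toList =
      (supsOf (secs s.toList false), hypsOf (secs s.toList false)) := by
    rw [sectionsB_eq (s.toList.length + 1) s.toList [] [] (Nat.lt_succ_self _) h]; simp
  have htls : supportsTls s =
      ((supsOf (secs s.toList false)).any hasAbbaB &&
        !((hypsOf (secs s.toList false)).any hasAbbaB)) := by
    rw [supportsTls, tlsLoop_eq s.toList.length s.toList false le_rfl h, hAB]
    simp
  have hssl : supportsSsl s =
      decide (0 <
        (PySem.Set.inter (PySem.Set.ofList ((supsOf (secs s.toList false)).flatMap abasB))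
          (PySem.Set.ofList ((hypsOf (secs s.toList false)).flatMap babsB))).length) := by
    rw [supportsSsl, sslLoop_eq s.toList.length s.toList [] [] le_rfl h, sslFinish_eq, hFA, hFB]
    simp
  simp only [hsec, htls, hssl]

theorem fold_eq : ∀ (ls : List String) (acc : Int × Int),
    (∀ s ∈ ls, bracketOk s.toList) →
    ls.foldl (fun (acc : Int × Int) line =>
      (acc.1 + (if supportsTls line then 1 else 0),
       acc.2 + (if supportsSsl line then 1 else 0))) acc =
    ls.foldl (fun (acc : Int × Int) line =>
      let sh := sectionsB (line.toList.length + 1) [] [] line.toList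
      let tlsOk := sh.1.any hasAbbaB && !(sh.2.any hasAbbaB)
      let supSet := PySem.Set.ofList (sh.1.flatMap abasB)
      let hypSet := PySem.Set.ofList (sh.2.flatMap babsB)
      let sslOk := decide (0 < (PySem.Set.inter supSet hypSet).length)
      (acc.1 + (if tlsOk then 1 else 0), acc.2 + (if sslOk then 1 else 0))) acc := by
  intro ls
  induction ls with
  | nil => intro acc _; rfl
  | cons s ls ih =>
    intro acc h
    simp only [List.foldl_cons]
    rw [line_eq s (h s (by simp)) acc]
    exact ih _ (fun u hu => h u (List.mem_cons_of_mem s hu))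

-- ===== VERDICT (by name: the statement is the Claim_ definition above) =====
theorem puzzles_spec : Claim_equal_puzzles := by
  intro input_lines _ hPre
  simp only [Spec_puzzles, puzzles, puzzles_alt]
  rw [fold_eq input_lines (0, 0) hPre]
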